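-- pv_equiv track=rewrite | github.com/SantiagoPanozzo/Python-PGM1-UCU | Listas/Ejercicios/Desafio1.py | digito_verificador
-- ===== SOURCE A (Python) =====
-- def digito_verificador(ci):
--     # Como la entrada es un número entero la paso a cadena de texto
--     ci = str(ci)
--     # Paso todos los caracteres a una lista
--     Cedula = list()
--     for i in ci:
--         Cedula.append(i)
--     suma = 0
--     valores = [2,9,8,7,6,3,4]
--     # Iteramos los caracteres de la Cedula y los multiplicamos por el valor corresponiente de los multiplicadores
--     if len(Cedula) == 7:
--         for i in range(len(Cedula)):
--             suma += int(Cedula[i]) * valores[i]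
--     # Si la Cedula es de 6 caracteres hacemos lo mismo pero ignorando el primero de los multiplicadores
--     elif len(Cedula) == 6:
--         for i in range(len(Cedula)):
--             suma += int(Cedula[i]) * valores[i+1]
--     # De lo contrario la Cedula no esta entre 100000 y 9999999, retornamos el -1
--     else: return -1
--     # Si la division entera es 0, retornamos 0, si es otro número hacemos el calculo de 10 menos el resto de la suma sobre 10
--     division = suma//10
--     if division == 0: return 0
--     else:
--         return 10-(suma%10)
-- ===== SOURCE B (Python) =====
-- def digito_verificador(ci):
--     # Purely arithmetic: no string conversion; extract digits right-to-left by divmod.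
--     if not (100000 <= ci <= 9999999):
--         return -1
--     suma = 0
--     n = ci
--     for w in (4, 3, 6, 7, 8, 9, 2):
--         n, d = divmod(n, 10)
--         suma += d * w
--     return 0 if suma < 10 else 10 - suma % 10
-- ===== Notes on version B (the rewrite author's own statement) =====
-- stated objective: alternative
-- what changed: B drops the string conversion entirely: it range-checks the integer arithmetically and extracts digits right-to-left with divmod in one accumulator loop over the reversed weight list, instead of A's str()/list() conversion with two per-length index-keyed loops over the character list.
import Mathlib
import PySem

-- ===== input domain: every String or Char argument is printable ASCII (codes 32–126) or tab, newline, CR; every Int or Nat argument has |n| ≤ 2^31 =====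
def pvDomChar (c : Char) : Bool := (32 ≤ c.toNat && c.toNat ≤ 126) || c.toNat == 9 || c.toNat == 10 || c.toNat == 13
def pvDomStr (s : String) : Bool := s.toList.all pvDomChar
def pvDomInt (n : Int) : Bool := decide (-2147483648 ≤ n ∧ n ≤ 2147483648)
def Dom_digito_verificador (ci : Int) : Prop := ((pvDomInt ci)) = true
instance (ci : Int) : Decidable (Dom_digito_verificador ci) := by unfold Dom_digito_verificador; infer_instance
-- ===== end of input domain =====

-- B replaces A's string conversion and two per-length index-keyed loops by an arithmetic
-- range check plus one divmod loop extracting digits right-to-left; objective: alternative.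

-- ===== PORT A =====
def digito_verificador (ci : Int) : Int :=
  -- ci = str(ci)
  let ciS : List Char := PySem.Int.toChars ci
  -- Cedula = []; for i in ci: Cedula.append(i)
  let cedula : List Char := ciS.foldl (fun acc i => acc ++ [i]) []
  let valores : List Int := [2, 9, 8, 7, 6, 3, 4]
  if cedula.length = 7 then
    -- for i in range(len(Cedula)): suma += int(Cedula[i]) * valores[i]
    let suma : Int := (PySem.List.pyRange 0 (cedula.length : Int) 1).foldl
      (fun suma i =>
        suma + (PySem.Int.ofChars? [PySem.List.pyGetD cedula i ' ']).getD 0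
                 * PySem.List.pyGetD valores i 0) 0
    let division := PySem.Int.floordiv suma 10
    if division = 0 then 0 else 10 - PySem.Int.mod suma 10
  else if cedula.length = 6 then
    -- for i in range(len(Cedula)): suma += int(Cedula[i]) * valores[i+1]
    let suma : Int := (PySem.List.pyRange 0 (cedula.length : Int) 1).foldl
      (fun suma i =>
        suma + (PySem.Int.ofChars? [PySem.List.pyGetD cedula i ' ']).getD 0
                 * PySem.List.pyGetD valores (i + 1) 0) 0
    let division := PySem.Int.floordiv suma 10
    if division = 0 then 0 else 10 - PySem.Int.mod suma 10
  else -1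

-- ===== PORT B =====
def digito_verificador_alt (ci : Int) : Int :=
  if ¬ (100000 ≤ ci ∧ ci ≤ 9999999) then -1
  else
    -- for w in (4,3,6,7,8,9,2): n, d = divmod(n, 10); suma += d * w
    let st : Int × Int := ([4, 3, 6, 7, 8, 9, 2] : List Int).foldl
      (fun (p : Int × Int) w =>
        (PySem.Int.floordiv p.1 10, p.2 + PySem.Int.mod p.1 10 * w)) (ci, 0)
    let suma := st.2
    if suma < 10 then 0 else 10 - PySem.Int.mod suma 10

-- ===== PRECONDITION & SPEC =====
-- Pre_ excludes exactly the inputs on which A raises ValueError: negative ci whose decimal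
-- string is six or seven characters long, where int('-') fails.
def Pre_digito_verificador (ci : Int) : Prop := ¬ (-999999 ≤ ci ∧ ci ≤ -10000)
instance (ci : Int) : Decidable (Pre_digito_verificador ci) := by unfold Pre_digito_verificador; infer_instance
def pvWitness_digito_verificador : Int := 123456
def Spec_digito_verificador (ci : Int) (out : Int) : Prop := out = digito_verificador_alt ci
instance (ci : Int) (out : Int) : Decidable (Spec_digito_verificador ci out) := by unfold Spec_digito_verificador; infer_instance

-- ===== CLAIM (what is proved, stated in full; the proofs are below) =====
def Claim_equal_digito_verificador : Prop := ∀ (ci : Int), Dom_digito_verificador ci → Pre_digito_verificador ci → Spec_digito_verificador ci (digito_verificador ci)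

-- ===== LEMMAS AND PROOFS =====

theorem pvCore_succ (fuel n : Nat) (ds : List Char) :
    Nat.toDigitsCore 10 (fuel + 1) n ds =
      if n / 10 = 0 then (n % 10).digitChar :: ds
      else Nat.toDigitsCore 10 fuel (n / 10) ((n % 10).digitChar :: ds) := rfl

-- Decimal representation of a Nat, most significant digit first.
def pvRep (n : Nat) : List Char :=
  if _h : n < 10 then [Nat.digitChar n]
  else pvRep (n / 10) ++ [Nat.digitChar (n % 10)]
decreasing_by exact Nat.div_lt_self (by omega) (by omega)

theorem pvRep_small (n : Nat) (h : n < 10) : pvRep n = [Nat.digitChar n] := by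
  rw [pvRep]; simp [h]

theorem pvRep_step (n : Nat) (h : 10 ≤ n) :
    pvRep n = pvRep (n / 10) ++ [Nat.digitChar (n % 10)] := by
  rw [pvRep]; simp [Nat.not_lt.2 h]

theorem pvToDigitsCore_eq (fuel : Nat) : ∀ (n : Nat) (ds : List Char), n ≤ fuel →
    Nat.toDigitsCore 10 (fuel + 1) n ds = pvRep n ++ ds := by
  induction fuel with
  | zero =>
    intro n ds hn
    interval_cases n
    simp [pvCore_succ, pvRep_small]
  | succ fuel ih =>
    intro n ds hn
    by_cases h : n / 10 = 0
    · have h10 : n < 10 := by omega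
      rw [pvCore_succ]
      simp [h, pvRep_small n h10, Nat.mod_eq_of_lt h10]
    · have h10 : 10 ≤ n := by omega
      have hle : n / 10 ≤ fuel := by omega
      rw [pvCore_succ, if_neg h, ih (n / 10) _ hle, pvRep_step n h10]
      simp

theorem pvToDigits_eq (n : Nat) : Nat.toDigits 10 n = pvRep n :=
  by simpa using pvToDigitsCore_eq n n [] le_rfl

theorem pvRep_len_le (k : Nat) : ∀ n, n < 10 ^ (k + 1) → (pvRep n).length ≤ k + 1 := by
  induction k with
  | zero => intro n h; rw [pvRep_small n (by omega)]; simp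
  | succ k ih =>
    intro n h
    by_cases h10 : n < 10
    · rw [pvRep_small n h10]; simp
    · rw [pvRep_step n (by omega)]
      have hq : n / 10 < 10 ^ (k + 1) := by
        rw [Nat.div_lt_iff_lt_mul (by norm_num), ← pow_succ]
        exact h
      have := ih (n / 10) hq
      simp [List.length_append]; omega

theorem pvRep_len_ge (k : Nat) : ∀ n, 10 ^ k ≤ n → k + 1 ≤ (pvRep n).length := by
  induction k with
  | zero =>
    intro n _
    by_cases h10 : n < 10
    · rw [pvRep_small n h10]; simp
    · rw [pvRep_step n (by omega)]; simp
  | succ k ih =>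
    intro n h
    have h10 : 10 ≤ n := le_trans (Nat.le_self_pow (by omega) 10) h
    rw [pvRep_step n h10]
    have hq : 10 ^ k ≤ n / 10 := by
      rw [Nat.le_div_iff_mul_le (by omega)]
      calc 10 ^ k * 10 = 10 ^ (k + 1) := by ring
        _ ≤ n := h
    have := ih (n / 10) hq
    simp [List.length_append]; omega

theorem pvDigitVal (m : Nat) (h : m < 10) :
    (PySem.Int.ofChars? [Nat.digitChar m]).getD 0 = (m : Int) := by
  interval_cases m <;> decide

-- ===== VERDICT (by name: the statement is the Claim_ definition above) =====
set_option maxHeartbeats 1600000 in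
theorem digito_verificador_spec : Claim_equal_digito_verificador := by
  intro ci _ hpre
  unfold Spec_digito_verificador digito_verificador digito_verificador_alt
  simp only [PySem.List.foldl_append_singleton_eq_map (f := fun i => i)
      (l := PySem.Int.toChars ci) (acc := []), List.nil_append, List.map_id']
  unfold PySem.Int.toChars
  by_cases hneg : ci < 0
  · -- negative: A's string is '-' followed by the digits of |ci|
    simp only [hneg, if_pos]
    rw [pvToDigits_eq]
    unfold Pre_digito_verificador at hpre
    have hm : ci.natAbs ≤ 9999 ∨ 1000000 ≤ ci.natAbs := by omega
    have hlen : ('-' :: pvRep ci.natAbs).length ≠ 7 ∧ ('-' :: pvRep ci.natAbs).length ≠ 6 := by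
      rcases hm with hm | hm
      · have := pvRep_len_le 3 ci.natAbs (by omega)
        simp [List.length_cons]; omega
      · have := pvRep_len_ge 6 ci.natAbs (by norm_num; omega)
        simp [List.length_cons]; omega
    rw [if_neg (by simpa using hlen.1), if_neg (by simpa using hlen.2),
        if_pos (by omega)]
  · -- nonnegative
    simp only [hneg, if_false]
    rw [pvToDigits_eq]
    obtain ⟨n, rfl⟩ : ∃ m : Nat, ci = (m : Int) := ⟨ci.toNat, by omega⟩
    simp only [Int.toNat_natCast]
    by_cases hlo : (n : Int) < 100000
    · -- fewer than 6 digits: both return -1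
      have := pvRep_len_le 4 n (by omega)
      rw [if_neg (by omega), if_neg (by omega), if_pos (by omega)]
    · by_cases hmid : (n : Int) < 1000000
      · -- six digits
        have e : pvRep n = [Nat.digitChar (n/10/10/10/10/10),
            Nat.digitChar (n/10/10/10/10 % 10), Nat.digitChar (n/10/10/10 % 10),
            Nat.digitChar (n/10/10 % 10), Nat.digitChar (n/10 % 10),
            Nat.digitChar (n % 10)] := by
          rw [pvRep_step n (by omega), pvRep_step (n/10) (by omega),
              pvRep_step (n/10/10) (by omega), pvRep_step (n/10/10/10) (by omega),
              pvRep_step (n/10/10/10/10) (by omega),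
              pvRep_small (n/10/10/10/10/10) (by omega)]
          simp
        rw [e]
        have t2 : Int.toNat 2 = 2 := rfl
        have t3 : Int.toNat 3 = 3 := rfl
        have t4 : Int.toNat 4 = 4 := rfl
        have t5 : Int.toNat 5 = 5 := rfl
        have t6 : Int.toNat 6 = 6 := rfl
        have hr6 : PySem.List.pyRange 0 6 1 = [0, 1, 2, 3, 4, 5] := by decide
        norm_num [hr6, List.foldl, PySem.List.pyGetD_ofNat', PySem.List.pyGetD,
          PySem.List.pyGet?, PySem.List.pyIdx?, t2, t3, t4, t5, t6,
          List.getElem_cons_zero, List.getElem_cons_succ,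
          pvDigitVal _ (show n/10/10/10/10/10 < 10 by omega),
          pvDigitVal _ (show n/10/10/10/10 % 10 < 10 by omega),
          pvDigitVal _ (show n/10/10/10 % 10 < 10 by omega),
          pvDigitVal _ (show n/10/10 % 10 < 10 by omega),
          pvDigitVal _ (show n/10 % 10 < 10 by omega),
          pvDigitVal _ (show n % 10 < 10 by omega),
          PySem.Int.floordiv, PySem.Int.mod, Int.fdiv_eq_ediv, Int.fmod_eq_emod]
        have q1 : (n : Int)/10 < 100000 := by omega
        have q2 : (n : Int)/10/10 < 10000 := by omega
        have q3 : (n : Int)/10/10/10 < 1000 := by omega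
        have q4 : (n : Int)/10/10/10/10 < 100 := by omega
        have q5 : (n : Int)/10/10/10/10/10 < 10 := by omega
        have q6 : (n : Int)/10/10/10/10/10/10 = 0 := by omega
        have q7 : (n : Int)/10/10/10/10/10/10/10 = 0 := by omega
        split_ifs <;> omega
      · by_cases hhi : (n : Int) ≤ 9999999
        · -- seven digits
          have e : pvRep n = [Nat.digitChar (n/10/10/10/10/10/10),
              Nat.digitChar (n/10/10/10/10/10 % 10), Nat.digitChar (n/10/10/10/10 % 10),
              Nat.digitChar (n/10/10/10 % 10), Nat.digitChar (n/10/10 % 10),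
              Nat.digitChar (n/10 % 10), Nat.digitChar (n % 10)] := by
            rw [pvRep_step n (by omega), pvRep_step (n/10) (by omega),
                pvRep_step (n/10/10) (by omega), pvRep_step (n/10/10/10) (by omega),
                pvRep_step (n/10/10/10/10) (by omega),
                pvRep_step (n/10/10/10/10/10) (by omega),
                pvRep_small (n/10/10/10/10/10/10) (by omega)]
            simp
          rw [e]
          have t2 : Int.toNat 2 = 2 := rfl
          have t3 : Int.toNat 3 = 3 := rfl
          have t4 : Int.toNat 4 = 4 := rfl
          have t5 : Int.toNat 5 = 5 := rfl
          have t6 : Int.toNat 6 = 6 := rfl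
          have hr7 : PySem.List.pyRange 0 7 1 = [0, 1, 2, 3, 4, 5, 6] := by decide
          norm_num [hr7, List.foldl, PySem.List.pyGetD_ofNat', PySem.List.pyGetD,
            PySem.List.pyGet?, PySem.List.pyIdx?, t2, t3, t4, t5, t6,
            List.getElem_cons_zero, List.getElem_cons_succ,
            pvDigitVal _ (show n/10/10/10/10/10/10 < 10 by omega),
            pvDigitVal _ (show n/10/10/10/10/10 % 10 < 10 by omega),
            pvDigitVal _ (show n/10/10/10/10 % 10 < 10 by omega),
            pvDigitVal _ (show n/10/10/10 % 10 < 10 by omega),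
            pvDigitVal _ (show n/10/10 % 10 < 10 by omega),
            pvDigitVal _ (show n/10 % 10 < 10 by omega),
            pvDigitVal _ (show n % 10 < 10 by omega),
            PySem.Int.floordiv, PySem.Int.mod, Int.fdiv_eq_ediv, Int.fmod_eq_emod]
          have q1 : (n : Int)/10 < 1000000 := by omega
          have q2 : (n : Int)/10/10 < 100000 := by omega
          have q3 : (n : Int)/10/10/10 < 10000 := by omega
          have q4 : (n : Int)/10/10/10/10 < 1000 := by omega
          have q5 : (n : Int)/10/10/10/10/10 < 100 := by omega
          have q6 : (n : Int)/10/10/10/10/10/10 < 10 := by omega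
          have q7 : (n : Int)/10/10/10/10/10/10/10 = 0 := by omega
          split_ifs <;> omega
        · -- more than 7 digits: both return -1
          have := pvRep_len_ge 7 n (by norm_num; omega)
          rw [if_neg (by omega), if_neg (by omega), if_pos (by omega)]
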